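-- pv_equiv track=rewrite | github.com/PurthaShaariyaar/OA | findYValue.py | findYValue
-- ===== SOURCE A (Python) =====
-- def findYValue(bits, maxSet, x):
--   y = ['0'] * bits
--
--   set_bits = 0
--
--   for i in range(bits):
--     if x[i] == '0' and set_bits < maxSet:
--       y[i] = '1'
--       set_bits += 1
--
--   y_str = ''.join(y)
--
--   return y_str
-- ===== SOURCE B (Python) =====
-- def findYValue(bits, maxSet, x):
--   zeros = [i for i in range(bits) if x[i] == '0']
--   chosen = zeros[:max(maxSet, 0)]
--   return ''.join('1' if i in chosen else '0' for i in range(bits))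
-- ===== Notes on version B (the rewrite author's own statement) =====
-- stated objective: alternative
-- what changed: Replaces A's single pass with a running counter and in-place list updates by a select-then-render decomposition: collect the zero positions, slice off the first max(maxSet,0) of them, and render the output by membership.
import Mathlib
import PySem

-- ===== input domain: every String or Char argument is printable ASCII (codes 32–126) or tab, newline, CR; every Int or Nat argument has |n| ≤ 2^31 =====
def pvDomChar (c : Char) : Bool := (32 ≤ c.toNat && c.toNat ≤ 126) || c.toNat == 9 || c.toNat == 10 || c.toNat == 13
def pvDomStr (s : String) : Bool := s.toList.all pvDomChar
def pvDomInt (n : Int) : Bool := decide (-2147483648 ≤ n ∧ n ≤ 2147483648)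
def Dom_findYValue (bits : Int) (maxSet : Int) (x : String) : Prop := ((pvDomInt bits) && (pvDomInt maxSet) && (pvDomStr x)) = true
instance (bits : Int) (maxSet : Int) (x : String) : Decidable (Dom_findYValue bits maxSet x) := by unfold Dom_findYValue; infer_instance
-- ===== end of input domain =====

-- B replaces A's running-counter single pass by a select-the-zero-indices-then-render decomposition (alternative, not faster).

-- ===== PORT A =====
-- loop body of A: if x[i] == '0' and set_bits < maxSet: y[i] = '1'; set_bits += 1
-- x[i] is ported as PySem.Str.pyGet? x i; Pre_findYValue keeps every accessed index in range, so '= some' is exact there.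
def findYValueStep (maxSet : Int) (x : String) (st : List Char × Int) (i : Int) : List Char × Int :=
  if PySem.Str.pyGet? x i = some '0' ∧ st.2 < maxSet then (st.1.set i.toNat '1', st.2 + 1) else st

def findYValue (bits : Int) (maxSet : Int) (x : String) : String :=
  let y : List Char := List.replicate bits.toNat '0'   -- ['0'] * bits (empty for bits ≤ 0, as in Python)
  let st := (PySem.List.pyRange 0 bits 1).foldl (findYValueStep maxSet x) (y, 0)
  String.mk st.1   -- ''.join(y)

-- ===== PORT B =====
def findYValue_alt (bits : Int) (maxSet : Int) (x : String) : String :=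
  let zeros := (PySem.List.pyRange 0 bits 1).filter (fun i => PySem.Str.pyGet? x i == some '0')
  let chosen := zeros.take (max maxSet 0).toNat   -- zeros[:max(maxSet, 0)]  (bound is nonnegative)
  String.mk ((PySem.List.pyRange 0 bits 1).map (fun i => if i ∈ chosen then '1' else '0'))

-- ===== PRECONDITION & SPEC =====
-- Pre_ excludes exactly the inputs where Python A raises IndexError: 0 < bits and x shorter than bits.
def Pre_findYValue (bits : Int) (maxSet : Int) (x : String) : Prop :=
  bits ≤ PySem.Str.len x ∨ bits ≤ 0
instance (bits : Int) (maxSet : Int) (x : String) : Decidable (Pre_findYValue bits maxSet x) := by unfold Pre_findYValue; infer_instance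
def pvWitness_findYValue : Int × Int × String := (3, 1, "010")

def Spec_findYValue (bits : Int) (maxSet : Int) (x : String) (out : String) : Prop := out = findYValue_alt bits maxSet x
instance (bits : Int) (maxSet : Int) (x : String) (out : String) : Decidable (Spec_findYValue bits maxSet x out) := by unfold Spec_findYValue; infer_instance

-- ===== CLAIM (what is proved, stated in full; the proofs are below) =====
def Claim_equal_findYValue : Prop := ∀ (bits : Int) (maxSet : Int) (x : String), Dom_findYValue bits maxSet x → Pre_findYValue bits maxSet x → Spec_findYValue bits maxSet x (findYValue bits maxSet x)

-- ===== LEMMAS AND PROOFS =====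

-- proof-side names for B's intermediate lists, over Nat-indexed ranges
def pvIdx (n : Nat) : List Int := (List.range n).map Int.ofNat

lemma pvIdx_succ (n : Nat) : pvIdx (n + 1) = pvIdx n ++ [Int.ofNat n] := by
  simp [pvIdx, List.range_succ]

def pvZl (x : String) (n : Nat) : List Int :=
  (pvIdx n).filter (fun i => PySem.Str.pyGet? x i == some '0')

def pvCh (x : String) (m n : Nat) : List Int := (pvZl x n).take m

def pvOm (x : String) (m N n : Nat) : List Char :=
  (List.range N).map (fun j => if Int.ofNat j ∈ pvCh x m n then '1' else '0')

lemma pvZl_len_le (x : String) (n : Nat) : (pvZl x n).length ≤ n := by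
  have := List.length_filter_le (fun i => PySem.Str.pyGet? x i == some '0') (pvIdx n)
  simpa [pvZl, pvIdx] using this

lemma set_map_range (N n : Nat) (f : Nat → Char) (v : Char) :
    ((List.range N).map f).set n v = (List.range N).map (fun i => if i = n then v else f i) := by
  apply List.ext_getElem
  · simp
  · intro j h1 h2
    by_cases hj : j = n
    · simp [hj]
    · simp [hj, Ne.symm hj]

lemma pvZl_succ (x : String) (n : Nat) :
    pvZl x (n + 1)
      = pvZl x n ++ (if x.toList[n]? = some '0' then [Int.ofNat n] else []) := by
  rw [pvZl, pvIdx_succ, List.filter_append, ← pvZl]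
  congr 1
  by_cases hp : x.toList[n]? = some '0' <;>
    simp [hp, PySem.Str.pyGet?, Int.ofNat_eq_natCast]

lemma pv_invariant (maxSet : Int) (x : String) (N : Nat) (n : Nat) :
    (pvIdx n).foldl (findYValueStep maxSet x) (List.replicate N '0', 0)
      = (pvOm x (max maxSet 0).toNat N n,
         ((min (pvZl x n).length (max maxSet 0).toNat : Nat) : Int)) := by
  set m : Nat := (max maxSet 0).toNat with hm
  induction n with
  | zero =>
      simp [pvIdx, pvOm, pvCh, pvZl]
  | succ n ih =>
      rw [pvIdx_succ, List.foldl_append, ih]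
      simp only [List.foldl_cons, List.foldl_nil]
      have hlen := pvZl_len_le x n
      have hz := pvZl_succ x n
      by_cases hp : x.toList[n]? = some '0'
      · have hp' : PySem.Str.pyGet? x (Int.ofNat n) = some '0' := by
          simp [PySem.Str.pyGet?, Int.ofNat_eq_natCast, hp]
        have hlen1 : (pvZl x (n + 1)).length = (pvZl x n).length + 1 := by
          rw [hz]; simp [hp]
        by_cases hlt : (pvZl x n).length < m
        · -- this index is set
          have hcond : ((min (pvZl x n).length m : Nat) : Int) < maxSet := by omega
          have hch1 : pvCh x m n = pvZl x n := by
            simp [pvCh, List.take_of_length_le (Nat.le_of_lt hlt)]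
          have hch2 : pvCh x m (n + 1) = pvZl x n ++ [Int.ofNat n] := by
            rw [pvCh, hz, if_pos hp]
            exact List.take_of_length_le (by simp; omega)
          rw [findYValueStep, if_pos ⟨hp', hcond⟩]
          refine Prod.ext ?_ ?_
          · show (pvOm x m N n).set (Int.toNat (Int.ofNat n)) '1' = pvOm x m N (n + 1)
            rw [pvOm, pvOm, show (Int.ofNat n).toNat = n from rfl, set_map_range]
            apply List.map_congr_left
            intro j hj
            by_cases hjn : j = n
            · subst hjn; simp [hch2]
            · have hmem : (Int.ofNat j ∈ pvCh x m (n + 1)) ↔ (Int.ofNat j ∈ pvCh x m n) := by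
                rw [hch1, hch2]
                simp [Int.ofNat_eq_natCast]
                intro h; exact absurd (by exact_mod_cast h) hjn
              simp only [Int.ofNat_eq_natCast] at hmem
              simp [hmem, hjn]
          · show ((min (pvZl x n).length m : Nat) : Int) + 1
                = ((min (pvZl x (n + 1)).length m : Nat) : Int)
            omega
        · -- budget exhausted: nothing changes
          have hcond : ¬ ((min (pvZl x n).length m : Nat) : Int) < maxSet := by omega
          have hch : pvCh x m (n + 1) = pvCh x m n := by
            rw [pvCh, pvCh, hz, if_pos hp]
            exact List.take_append_of_le_length (by omega)
          rw [findYValueStep, if_neg (by tauto)]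
          refine Prod.ext ?_ ?_
          · show pvOm x m N n = pvOm x m N (n + 1)
            rw [pvOm, pvOm, hch]
          · show ((min (pvZl x n).length m : Nat) : Int)
                = ((min (pvZl x (n + 1)).length m : Nat) : Int)
            omega
      · -- x[n] is not '0': nothing changes
        have hp' : ¬ PySem.Str.pyGet? x (Int.ofNat n) = some '0' := by
          simp [PySem.Str.pyGet?, Int.ofNat_eq_natCast, hp]
        have hz' : pvZl x (n + 1) = pvZl x n := by rw [hz, if_neg hp]; simp
        rw [findYValueStep, if_neg (by tauto)]
        refine Prod.ext ?_ ?_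
        · show pvOm x m N n = pvOm x m N (n + 1)
          rw [pvOm, pvOm, pvCh, pvCh, hz']
        · show ((min (pvZl x n).length m : Nat) : Int)
              = ((min (pvZl x (n + 1)).length m : Nat) : Int)
          rw [hz']

lemma pv_alt_eq (bits : Int) (maxSet : Int) (x : String) (hb : 0 ≤ bits) :
    findYValue_alt bits maxSet x
      = String.mk (pvOm x (max maxSet 0).toNat bits.toNat bits.toNat) := by
  rw [findYValue_alt]
  have hr : PySem.List.pyRange 0 bits 1 = pvIdx bits.toNat := by
    rw [PySem.List.pyRange_one, pvIdx]
    simp [Int.ofNat_eq_natCast]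
  simp only [hr]
  congr 1
  rw [pvIdx, List.map_map]
  simp only [pvOm, pvCh, pvZl, pvIdx]
  rfl

-- ===== VERDICT (by name: the statement is the Claim_ definition above) =====
theorem findYValue_spec : Claim_equal_findYValue := by
  intro bits maxSet x _ _
  show findYValue bits maxSet x = findYValue_alt bits maxSet x
  by_cases hb : 0 ≤ bits
  · rw [findYValue, pv_alt_eq bits maxSet x hb]
    have hr : PySem.List.pyRange 0 bits 1 = pvIdx bits.toNat := by
      rw [PySem.List.pyRange_one, pvIdx]; simp [Int.ofNat_eq_natCast]
    simp only [hr, pv_invariant maxSet x bits.toNat bits.toNat]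
  · -- bits < 0: empty range on both sides
    have h1 : PySem.List.pyRange 0 bits 1 = [] := PySem.List.pyRange_one_eq_nil (by omega)
    have h2 : bits.toNat = 0 := by omega
    rw [findYValue, findYValue_alt]
    simp [h1, h2]
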